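-- pv_equiv track=rewrite | github.com/rossi-jeff/python-games-fastapi | utilities/ten_grand.py | ScoreFiveKind
-- ===== SOURCE A (Python) =====
-- from typing import List
--
-- def MapDieFaces(dice: List[int]):
--     dieMap = {}
--     for d in dice:
--         if not d in dieMap:
--             dieMap[d] = 0
--         dieMap[d] = dieMap[d] + 1
--     keys: List[int] = []
--     for k in dieMap.keys():
--         keys.append(k)
--     values: List[int] = []
--     for v in dieMap.values():
--         values.append(v)
--     return dieMap, keys, values
--
-- def ScoreFiveKind(dice: List[int]):
--     score = 0
--     dieMap, keys, _ = MapDieFaces(dice)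
--     for k in keys:
--         if dieMap[k] == 5:
--             if k == 1:
--                 score = score + 4000
--             else:
--                 score = score + (k * 400)
--     return score
-- ===== SOURCE B (Python) =====
-- def ScoreFiveKind(dice):
--     s = sorted(dice)
--     if not s:
--         return 0
--     score = 0
--     cur = s[0]
--     run = 1
--     for x in s[1:]:
--         if x == cur:
--             run += 1
--         else:
--             if run == 5:
--                 score += 4000 if cur == 1 else cur * 400
--             cur = x
--             run = 1
--     if run == 5:
--         score += 4000 if cur == 1 else cur * 400
--     return score
-- ===== Notes on version B (the rewrite author's own statement) =====
-- stated objective: alternative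
-- what changed: Replaces the dict-based frequency count (build a face->count map, then loop its keys) with a sort-then-scan: sort a copy of the dice and walk it once tracking the current run, scoring each maximal run of length exactly 5.
import Mathlib
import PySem

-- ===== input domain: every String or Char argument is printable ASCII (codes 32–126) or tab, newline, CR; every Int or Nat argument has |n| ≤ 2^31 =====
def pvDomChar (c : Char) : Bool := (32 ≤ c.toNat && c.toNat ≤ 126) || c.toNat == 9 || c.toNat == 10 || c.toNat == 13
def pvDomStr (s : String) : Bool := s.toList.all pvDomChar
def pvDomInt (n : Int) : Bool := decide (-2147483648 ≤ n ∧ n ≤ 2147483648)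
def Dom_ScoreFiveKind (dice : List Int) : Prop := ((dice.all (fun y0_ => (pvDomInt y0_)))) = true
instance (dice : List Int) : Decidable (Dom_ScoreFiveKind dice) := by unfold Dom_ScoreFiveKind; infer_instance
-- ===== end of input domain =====

-- B replaces A's dict-based frequency count with a sort-then-scan over maximal runs; alternative algorithm, same results.

-- ===== PORT A =====
def MapDieFaces (dice : List Int) : PySem.Dict Int Int × List Int × List Int :=
  let dieMap := dice.foldl (fun d x =>
    let d := if d.contains x = false then d.insert x 0 else d
    d.insert x (d.getD x 0 + 1)) PySem.Dict.empty
  let keys := dieMap.keys.foldl (fun ks k => ks ++ [k]) []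
  let values := dieMap.values.foldl (fun vs v => vs ++ [v]) []
  (dieMap, keys, values)

def ScoreFiveKind (dice : List Int) : Int :=
  match MapDieFaces dice with
  | (dieMap, keys, _) =>
    keys.foldl (fun score k =>
      if dieMap.getD k 0 = 5 then
        if k = 1 then score + 4000 else score + k * 400
      else score) 0

-- ===== PORT B =====
def ScoreFiveKind_alt (dice : List Int) : Int :=
  match PySem.List.sorted dice (fun x => x) false with
  | [] => 0
  | c :: rest =>
    match rest.foldl (fun (st : Int × Int × Int) x =>
        match st with
        | (score, cur, run) =>
          if x = cur then (score, cur, run + 1)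
          else ((if run = 5 then (if cur = 1 then score + 4000 else score + cur * 400) else score), x, 1))
      (0, c, 1) with
    | (score, cur, run) =>
      if run = 5 then (if cur = 1 then score + 4000 else score + cur * 400) else score

-- ===== PRECONDITION & SPEC =====
def Spec_ScoreFiveKind (dice : List Int) (out : Int) : Prop := out = ScoreFiveKind_alt dice
instance (dice : List Int) (out : Int) : Decidable (Spec_ScoreFiveKind dice out) := by unfold Spec_ScoreFiveKind; infer_instance

-- ===== CLAIM (what is proved, stated in full; the proofs are below) =====
def Claim_equal_ScoreFiveKind : Prop := ∀ (dice : List Int), Dom_ScoreFiveKind dice → Spec_ScoreFiveKind dice (ScoreFiveKind dice)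

-- ===== LEMMAS AND PROOFS =====

/-- Points contributed by a face `k` occurring `c` times. -/
def contrib (k c : Int) : Int := if c = 5 then (if k = 1 then 4000 else k * 400) else 0

/-- Canonical value: sum of contributions over the distinct faces. -/
def F (l : List Int) : Int := ∑ k ∈ l.toFinset, contrib k (l.count k)

theorem foldl_append_singleton_id (l acc : List Int) :
    l.foldl (fun ks k => ks ++ [k]) acc = acc ++ l := by
  induction l generalizing acc with
  | nil => simp
  | cons x xs ih => simp [List.foldl_cons, ih]

theorem wrap_eq (s c r : Int) :
    (if r = 5 then (if c = 1 then s + 4000 else s + c * 400) else s) = s + contrib c r := by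
  simp only [contrib]; split_ifs <;> ring_nf

theorem sum_dedup (l : List Int) (f : Int → Int) :
    ((PySem.List.dedup l).map f).sum = ∑ k ∈ l.toFinset, f k := by
  rw [← List.sum_toFinset f (PySem.List.nodup_dedup l)]
  congr 1
  ext k
  simp

theorem F_cons (c : Int) (rest : List Int) :
    F (c :: rest) = contrib c (1 + (rest.count c : Int))
      + ∑ k ∈ rest.toFinset.erase c, contrib k (rest.count k) := by
  unfold F
  have h1 : (c :: rest).toFinset = insert c rest.toFinset := by simp
  rw [h1, ← Finset.add_sum_erase _ _ (Finset.mem_insert_self c rest.toFinset),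
      Finset.erase_insert_eq_erase]
  congr 1
  · congr 1; rw [List.count_cons_self]; push_cast; ring_nf
  · apply Finset.sum_congr rfl
    intro k hk
    have hne : c ≠ k := fun h => (Finset.mem_erase.mp hk).1 h.symm
    simp [hne]

def stepB : Int × Int × Int → Int → Int × Int × Int :=
  fun (st : Int × Int × Int) x =>
    match st with
    | (score, cur, run) =>
      if x = cur then (score, cur, run + 1)
      else ((if run = 5 then (if cur = 1 then score + 4000 else score + cur * 400) else score), x, 1)

theorem loopB_eq (l : List Int) : ∀ (score cur run : Int),
    l.Pairwise (· ≤ ·) → (∀ x ∈ l, cur ≤ x) →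
    (match l.foldl stepB (score, cur, run) with
     | (s, c, r) => if r = 5 then (if c = 1 then s + 4000 else s + c * 400) else s)
    = score + contrib cur (run + l.count cur) + ∑ k ∈ l.toFinset.erase cur, contrib k (l.count k) := by
  induction l with
  | nil =>
    intro score cur run _ _
    simp [wrap_eq]
  | cons x xs ih =>
    intro score cur run hp hge
    have hxs : xs.Pairwise (· ≤ ·) := hp.tail
    have hx : ∀ y ∈ xs, x ≤ y := (List.pairwise_cons.mp hp).1
    by_cases hxc : x = cur
    · subst hxc
      rw [List.foldl_cons, show stepB (score, x, run) x = (score, x, run + 1) by simp [stepB]]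
      rw [ih score x (run + 1) hxs (fun y hy => le_of_eq rfl |>.trans (hx y hy))]
      have hts : (x :: xs).toFinset.erase x = xs.toFinset.erase x := by
        simp [Finset.erase_insert_eq_erase]
      rw [hts]
      congr 1
      · congr 1; rw [List.count_cons_self]; push_cast; ring_nf
      · apply Finset.sum_congr rfl
        intro k hk
        have hne : x ≠ k := fun h => (Finset.mem_erase.mp hk).1 h.symm
        simp [hne]
    · have hcx : cur < x := lt_of_le_of_ne (hge x (List.mem_cons_self)) (fun h => hxc h.symm)
      rw [List.foldl_cons,
        show stepB (score, cur, run) x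
            = (score + contrib cur run, x, 1) by simp [stepB, hxc, wrap_eq]]
      rw [ih (score + contrib cur run) x 1 hxs hx]
      have hcurnot : cur ∉ (x :: xs).toFinset := by
        simp only [List.mem_toFinset, List.mem_cons]
        rintro (h | h)
        · exact hxc h.symm
        · exact absurd (hcx.trans_le (hx cur h)) (lt_irrefl cur)
      have hcount0 : (x :: xs).count cur = 0 := by
        rw [List.count_eq_zero]
        intro hmem; exact hcurnot (List.mem_toFinset.mpr hmem)
      rw [Finset.erase_eq_of_notMem hcurnot, hcount0]
      have : (∑ k ∈ (x :: xs).toFinset, contrib k ((x :: xs).count k)) = F (x :: xs) := rfl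
      rw [this, F_cons]
      push_cast
      ring_nf

theorem ScoreFiveKind_spec' (dice : List Int) : ScoreFiveKind dice = F dice := by
  unfold ScoreFiveKind MapDieFaces
  simp only [foldl_append_singleton_id, List.nil_append]
  have hstep : (fun (d : PySem.Dict Int Int) (x : Int) =>
      let d := if d.contains x = false then d.insert x 0 else d
      d.insert x (d.getD x 0 + 1))
      = fun (d : PySem.Dict Int Int) (x : Int) => d.insert x (d.getD x 0 + 1) := by
    funext d x
    by_cases h : d.contains x
    · simp [h]
    · simp only [Bool.not_eq_true] at h
      simp [h, PySem.Dict.getD_insert_self, PySem.Dict.insert_insert_self,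
        PySem.Dict.getD_of_not_contains _ _ h]
  rw [hstep, PySem.Dict.foldl_insert_getD_add_one_eq_counter]
  have hfold : ∀ (ks : List Int) (a : Int),
      ks.foldl (fun score k =>
        if (PySem.Dict.counter dice).getD k 0 = 5 then
          if k = 1 then score + 4000 else score + k * 400
        else score) a
      = a + (ks.map (fun k => contrib k ((dice.count k : Int)))).sum := by
    intro ks
    induction ks with
    | nil => intro a; simp
    | cons k ks ihk =>
      intro a
      rw [List.foldl_cons, ihk, List.map_cons, List.sum_cons]
      simp only [PySem.Dict.getD_counter, contrib]
      split_ifs <;> ring_nf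
  rw [hfold, PySem.Dict.keys_counter, ← PySem.List.dedup_eq_ofList, sum_dedup]
  unfold F
  ring_nf

theorem ScoreFiveKind_alt_spec' (dice : List Int) : ScoreFiveKind_alt dice = F dice := by
  unfold ScoreFiveKind_alt
  rcases h : PySem.List.sorted dice (fun x => x) false with _ | ⟨c, rest⟩
  · rw [PySem.List.sorted_eq_nil_iff] at h
    subst h
    simp [F]
  · have hperm : (c :: rest).Perm dice := h ▸ PySem.List.sorted_perm dice (fun x => x) false
    have hpw : (c :: rest).Pairwise (fun a b => a ≤ b) := by
      have := PySem.List.sorted_pairwise dice (fun x => x)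
      rw [h] at this
      exact this
    have hF : F dice = F (c :: rest) := by
      unfold F
      rw [show (c :: rest).toFinset = dice.toFinset by
        ext k; simp only [List.mem_toFinset]; exact hperm.mem_iff]
      exact Finset.sum_congr rfl (fun k _ => by rw [hperm.count_eq])
    rw [hF]
    have := loopB_eq rest 0 c 1 hpw.tail (List.pairwise_cons.mp hpw).1
    change (match rest.foldl stepB (0, c, 1) with
      | (score, cur, run) =>
        if run = 5 then (if cur = 1 then score + 4000 else score + cur * 400) else score) = F (c :: rest)
    rw [this, F_cons]
    ring_nf

-- ===== VERDICT (by name: the statement is the Claim_ definition above) =====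
theorem ScoreFiveKind_spec : Claim_equal_ScoreFiveKind := by
  intro dice _
  unfold Spec_ScoreFiveKind
  rw [ScoreFiveKind_spec', ScoreFiveKind_alt_spec']
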